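-- pv_equiv track=rewrite | github.com/JRPdata/cyclone_genesis | auto_generate_adecks_from_atcf.py | combine_atcf_dicts_to_deck
-- ===== SOURCE A (Python) =====
-- def combine_atcf_dicts_to_deck(atcf_dicts):
--     decks_by_atcf_id = {}
--     for atcf_dict in atcf_dicts:
--         for atcf_id, atcf_time_lines_tuple in atcf_dict.items():
--             if atcf_id not in decks_by_atcf_id:
--                 decks_by_atcf_id[atcf_id] = [atcf_time_lines_tuple]
--             else:
--                 decks_by_atcf_id[atcf_id].append(atcf_time_lines_tuple)
--
--     decks_by_atcf_id_sorted = {}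
--     for atcf_id, tuples in decks_by_atcf_id.items():
--         sorted_tuples = sorted(tuples, key=lambda x: x[0])
--         # model_init_times = [t[0] for t in sorted_tuples]
--         deck_strings = '\n'.join([line for t in sorted_tuples for line in t[1]])
--         decks_by_atcf_id_sorted[atcf_id] = deck_strings
--
--     return decks_by_atcf_id_sorted
-- ===== SOURCE B (Python) =====
-- def combine_atcf_dicts_to_deck(atcf_dicts):
--     # Flatten all dicts into one list of (atcf_id, tuple) pairs in original order.
--     flat = [(atcf_id, t) for atcf_dict in atcf_dicts for atcf_id, t in atcf_dict.items()]
--     # One global stable sort by model init time; ties keep the original order,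
--     # so each id's tuples appear exactly as its per-group stable sort would order them.
--     groups = {}
--     for atcf_id, t in sorted(flat, key=lambda p: p[1][0]):
--         if atcf_id in groups:
--             groups[atcf_id].extend(t[1])
--         else:
--             groups[atcf_id] = list(t[1])
--     # Emit keys in first-occurrence order of the input.
--     order = dict.fromkeys(atcf_id for atcf_id, _ in flat)
--     return {atcf_id: '\n'.join(groups[atcf_id]) for atcf_id in order}
-- ===== Notes on version B (the rewrite author's own statement) =====
-- stated objective: alternative
-- what changed: Instead of grouping tuples per id and then sorting each group separately, B flattens all dicts into one list, does a single global stable sort by init time (stability makes each id's subsequence equal to its per-group sort), groups lines in one pass, and emits keys in first-occurrence order.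
import Mathlib
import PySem

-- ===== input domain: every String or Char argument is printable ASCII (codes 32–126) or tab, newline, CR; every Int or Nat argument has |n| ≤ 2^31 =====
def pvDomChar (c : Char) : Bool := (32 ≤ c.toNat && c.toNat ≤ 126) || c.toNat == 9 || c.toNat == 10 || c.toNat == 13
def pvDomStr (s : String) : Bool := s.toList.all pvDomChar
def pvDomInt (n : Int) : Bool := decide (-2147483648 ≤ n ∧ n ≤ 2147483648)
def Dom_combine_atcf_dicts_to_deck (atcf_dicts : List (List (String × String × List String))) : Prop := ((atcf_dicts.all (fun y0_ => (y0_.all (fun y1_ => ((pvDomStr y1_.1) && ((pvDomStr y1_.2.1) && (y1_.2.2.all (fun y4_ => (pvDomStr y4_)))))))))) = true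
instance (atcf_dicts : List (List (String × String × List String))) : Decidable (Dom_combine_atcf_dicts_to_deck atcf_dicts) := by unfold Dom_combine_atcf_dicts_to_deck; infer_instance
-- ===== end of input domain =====

-- B replaces A's group-then-sort-each-group scheme by one global stable sort plus a single
-- grouping pass (alternative decomposition, same asymptotic cost); return values are equal.

-- ===== PORT A =====
def combine_atcf_dicts_to_deck (atcf_dicts : List (List (String × String × List String))) : List (String × String) :=
  -- first loop: decks_by_atcf_id[atcf_id] collects the tuples, in input order
  let decks_by_atcf_id : PySem.Dict String (List (String × List String)) :=
    atcf_dicts.foldl (fun decks atcf_dict =>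
      atcf_dict.foldl (fun decks p =>
        if decks.contains p.1 = false then decks.insert p.1 [p.2]
        else decks.modify p.1 [] (fun ts => ts ++ [p.2])) decks) PySem.Dict.empty
  -- second loop: sort each id's tuples by time, join the lines
  let decks_by_atcf_id_sorted : PySem.Dict String String :=
    decks_by_atcf_id.items.foldl (fun out q =>
      let sorted_tuples := PySem.List.sorted q.2 (fun t => t.1)
      out.insert q.1 (PySem.Str.join "\n" (sorted_tuples.flatMap (fun t => t.2)))) PySem.Dict.empty
  decks_by_atcf_id_sorted.items

-- ===== PORT B =====
def combine_atcf_dicts_to_deck_alt (atcf_dicts : List (List (String × String × List String))) : List (String × String) :=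
  -- flatten, one global stable sort by time, one grouping pass, keys in first-occurrence order
  let flat : List (String × String × List String) := atcf_dicts.flatMap (fun atcf_dict => atcf_dict)
  let groups : PySem.Dict String (List String) :=
    (PySem.List.sorted flat (fun p => p.2.1)).foldl
      (fun g p => if g.contains p.1 = true then g.modify p.1 [] (fun ls => ls ++ p.2.2)
                  else g.insert p.1 p.2.2) PySem.Dict.empty
  let order : List String := PySem.List.dedup (flat.map (fun p => p.1))
  (order.foldl (fun r c => r.insert c (PySem.Str.join "\n" (groups.getD c []))) PySem.Dict.empty).items

-- ===== PRECONDITION & SPEC =====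
def Spec_combine_atcf_dicts_to_deck (atcf_dicts : List (List (String × String × List String))) (out : List (String × String)) : Prop := out = combine_atcf_dicts_to_deck_alt atcf_dicts
instance (atcf_dicts : List (List (String × String × List String))) (out : List (String × String)) : Decidable (Spec_combine_atcf_dicts_to_deck atcf_dicts out) := by unfold Spec_combine_atcf_dicts_to_deck; infer_instance

-- ===== CLAIM (what is proved, stated in full; the proofs are below) =====
def Claim_equal_combine_atcf_dicts_to_deck : Prop := ∀ (atcf_dicts : List (List (String × String × List String))), Dom_combine_atcf_dicts_to_deck atcf_dicts → Spec_combine_atcf_dicts_to_deck atcf_dicts (combine_atcf_dicts_to_deck atcf_dicts)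

-- ===== LEMMAS AND PROOFS =====

-- unfolding equation for PySem's insertion step
theorem pv_insertBy_cons {α : Type} (before : α → α → Bool) (x y : α) (ys : List α) :
    PySem.List.insertBy before x (y :: ys) =
      if before x y then x :: y :: ys else y :: PySem.List.insertBy before x ys := by
  simp [PySem.List.insertBy]

-- inserting into a key-sorted list commutes with filtering
theorem pv_insertBy_filter {α κ : Type} [LinearOrder κ] (key : α → κ) (p : α → Bool) (x : α)
    (ys : List α) (h : ys.Pairwise (fun a b => key a ≤ key b)) :
    (PySem.List.insertBy (fun a b => decide (key a < key b)) x ys).filter p =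
      if p x then PySem.List.insertBy (fun a b => decide (key a < key b)) x (ys.filter p)
      else ys.filter p := by
  induction ys with
  | nil => by_cases hx : p x <;> simp [PySem.List.insertBy, hx]
  | cons y ys ih =>
    rw [List.pairwise_cons] at h
    obtain ⟨h1, h2⟩ := h
    by_cases hlt : key x < key y
    · by_cases hx : p x
      · by_cases hy : p y
        · simp [PySem.List.insertBy, hlt, hx, hy]
        · -- p x, ¬ p y : x still goes before everything kept from ys
          simp only [PySem.List.insertBy, hlt, decide_true, if_true, List.filter_cons, hx, hy,
            Bool.false_eq_true, if_false, if_true]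
          cases hzs : ys.filter p with
          | nil => simp [PySem.List.insertBy]
          | cons z zs =>
            have hz : z ∈ ys := List.mem_of_mem_filter (hzs ▸ List.mem_cons_self)
            have : key x < key z := lt_of_lt_of_le hlt (h1 z hz)
            simp [PySem.List.insertBy, this]
      · by_cases hy : p y <;> simp [PySem.List.insertBy, hlt, hx, hy]
    · by_cases hx : p x
      · by_cases hy : p y <;> simp [PySem.List.insertBy, hlt, hx, hy, ih h2]
      · by_cases hy : p y <;> simp [PySem.List.insertBy, hlt, hx, hy, ih h2]

-- the insertion-sort fold commutes with filtering (sorted accumulator)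
theorem pv_foldl_insertBy_filter {α κ : Type} [LinearOrder κ] (key : α → κ) (p : α → Bool)
    (l : List α) (acc : List α) (h : acc.Pairwise (fun a b => key a ≤ key b)) :
    (l.foldl (fun acc x => PySem.List.insertBy (fun a b => decide (key a < key b)) x acc) acc).filter p =
      (l.filter p).foldl (fun acc x => PySem.List.insertBy (fun a b => decide (key a < key b)) x acc) (acc.filter p) := by
  induction l generalizing acc with
  | nil => simp
  | cons x l ih =>
    have hacc' := PySem.List.insertBy_pairwise_le key x acc h
    rw [List.foldl_cons, ih _ hacc', pv_insertBy_filter key p x acc h, List.filter_cons]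
    by_cases hx : p x <;> simp [hx]

-- STABILITY: the stable sort commutes with filtering
theorem pv_sorted_filter {α κ : Type} [LinearOrder κ] (key : α → κ) (p : α → Bool) (xs : List α) :
    (PySem.List.sorted xs key).filter p = PySem.List.sorted (xs.filter p) key := by
  rw [PySem.List.sorted_eq_foldl_insertBy, PySem.List.sorted_eq_foldl_insertBy]
  simpa using pv_foldl_insertBy_filter key p xs [] List.Pairwise.nil

-- inserting the snd projection = projecting the pair insertion
theorem pv_insertBy_snd (x : String × String × List String) (ys : List (String × String × List String)) :
    PySem.List.insertBy (fun a b => decide (a.1 < b.1)) x.2 (ys.map (fun p => p.2)) =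
      (PySem.List.insertBy (fun a b => decide (a.2.1 < b.2.1)) x ys).map (fun p => p.2) := by
  induction ys with
  | nil => simp [PySem.List.insertBy]
  | cons y ys ih =>
    rw [List.map_cons, pv_insertBy_cons, pv_insertBy_cons]
    by_cases hlt : x.2.1 < y.2.1
    · rw [if_pos (by simpa using hlt), if_pos (by simpa using hlt), List.map_cons, List.map_cons]
    · rw [if_neg (by simpa using hlt), if_neg (by simpa using hlt), List.map_cons, ih]

theorem pv_foldl_insertBy_snd (l : List (String × String × List String))
    (acc : List (String × String × List String)) :
    (l.foldl (fun acc x => PySem.List.insertBy (fun a b => decide (a.2.1 < b.2.1)) x acc) acc).map (fun p => p.2) =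
      (l.map (fun p => p.2)).foldl (fun acc x => PySem.List.insertBy (fun a b => decide (a.1 < b.1)) x acc)
        (acc.map (fun p => p.2)) := by
  induction l generalizing acc with
  | nil => simp
  | cons x l ih => rw [List.foldl_cons, ih, List.map_cons, List.foldl_cons, pv_insertBy_snd]

-- sorting the projected tuples by time = projecting the pairs sorted by time
theorem pv_sorted_snd (l : List (String × String × List String)) :
    PySem.List.sorted (l.map (fun p => p.2)) (fun t => t.1) =
      (PySem.List.sorted l (fun p => p.2.1)).map (fun p => p.2) := by
  rw [PySem.List.sorted_eq_foldl_insertBy, PySem.List.sorted_eq_foldl_insertBy]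
  simpa using (pv_foldl_insertBy_snd l []).symm

-- B's grouping pass, characterised by lookup
theorem pv_groups_getD (l : List (String × String × List String))
    (g : PySem.Dict String (List String)) (c : String) :
    (l.foldl (fun g p => g.insert p.1 (g.getD p.1 [] ++ p.2.2)) g).getD c [] =
      g.getD c [] ++ (l.filter (fun p => p.1 == c)).flatMap (fun p => p.2.2) := by
  induction l generalizing g with
  | nil => simp
  | cons q l ih =>
    rw [List.foldl_cons, ih, PySem.Dict.getD_insert, List.filter_cons]
    by_cases hc : q.1 = c
    · simp [hc]
    · simp [hc, Ne.symm hc]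

-- A's first-loop body is the modify-with-default loop body
theorem pv_stepA_eq :
    (fun (decks : PySem.Dict String (List (String × List String))) (p : String × String × List String) =>
      if decks.contains p.1 = false then decks.insert p.1 [p.2]
      else decks.modify p.1 [] (fun ts => ts ++ [p.2])) =
    (fun decks p => decks.modify p.1 [] (fun ts => ts ++ [p.2])) := by
  funext decks p
  by_cases h : decks.contains p.1 = false
  · simp [h, PySem.Dict.modify, PySem.Dict.getD_of_not_contains _ _ h]
  · simp [h]

-- A's result in normal form: keys in first-occurrence order, each group sorted then joined
theorem pv_A_eq (atcf_dicts : List (List (String × String × List String))) :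
    combine_atcf_dicts_to_deck atcf_dicts =
      (PySem.List.dedup ((atcf_dicts.flatMap (fun atcf_dict => atcf_dict)).map (fun p => p.1))).map
        (fun c => (c, PySem.Str.join "\n"
          ((PySem.List.sorted
            (((atcf_dicts.flatMap (fun atcf_dict => atcf_dict)).filter (fun p => p.1 == c)).map (fun p => p.2))
            (fun t => t.1)).flatMap (fun t => t.2)))) := by
  unfold combine_atcf_dicts_to_deck
  dsimp only
  rw [show (fun (decks : PySem.Dict String (List (String × List String)))
        (atcf_dict : List (String × String × List String)) =>
        atcf_dict.foldl (fun decks p =>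
          if decks.contains p.1 = false then decks.insert p.1 [p.2]
          else decks.modify p.1 [] (fun ts => ts ++ [p.2])) decks)
      = (fun decks atcf_dict => atcf_dict.foldl (fun decks p => decks.modify p.1 [] (fun ts => ts ++ [p.2])) decks)
      from by rw [pv_stepA_eq]]
  rw [← List.foldl_flatMap]
  set flat := atcf_dicts.flatMap (fun atcf_dict => atcf_dict) with hflat
  set decks := flat.foldl (fun decks p => decks.modify p.1 [] (fun ts => ts ++ [p.2])) PySem.Dict.empty with hdecks
  have hnodup : decks.keys.Nodup := by
    rw [hdecks]
    exact PySem.Dict.nodup_keys_foldl_modify_key flat (fun p => p.1) [] (fun d p => fun ts => ts ++ [p.2])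
      PySem.Dict.empty (by simp [PySem.Dict.empty, PySem.Dict.keys])
  have hkeys : decks.keys = PySem.List.dedup (flat.map (fun p => p.1)) := by
    rw [hdecks, PySem.Dict.keys_foldl_modify_key flat (fun p => p.1) [] (fun d p => fun ts => ts ++ [p.2])]
    simp [PySem.Dict.empty, PySem.Dict.keys, PySem.Set.update_eq_append_filter,
      PySem.Set.contains_eq_listContains]
  have hgetD : ∀ c, decks.getD c [] = (flat.filter (fun p => p.1 == c)).map (fun p => p.2) := by
    intro c
    rw [hdecks, PySem.Dict.getD_foldl_modify_append]
    simp [PySem.Dict.getD_empty]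
  rw [PySem.Dict.items_foldl_insert_fresh decks.items (fun q => q.1)
        (fun q => PySem.Str.join "\n" ((PySem.List.sorted q.2 (fun t => t.1)).flatMap (fun t => t.2)))
        PySem.Dict.empty (fun a _ => by simp [PySem.Dict.contains_empty])
        (by simpa [PySem.Dict.keys] using hnodup)]
  rw [PySem.Dict.items_eq_map_keys decks hnodup []]
  simp only [List.map_map, PySem.Dict.empty]
  rw [hkeys]
  refine List.map_congr_left ?_
  intro c _
  simp [hgetD c]

-- B's grouping-loop body is the uniform getD-append insert
theorem pv_stepB_eq :
    (fun (g : PySem.Dict String (List String)) (p : String × String × List String) =>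
      if g.contains p.1 = true then g.modify p.1 [] (fun ls => ls ++ p.2.2)
      else g.insert p.1 p.2.2) =
    (fun g p => g.insert p.1 (g.getD p.1 [] ++ p.2.2)) := by
  funext g p
  by_cases h : g.contains p.1 = true
  · simp [h, PySem.Dict.modify]
  · have h' : g.contains p.1 = false := by simpa using h
    simp [h', PySem.Dict.getD_of_not_contains _ _ h']

-- B's result in normal form: same keys, each value read back from the grouping dict
theorem pv_B_eq (atcf_dicts : List (List (String × String × List String))) :
    combine_atcf_dicts_to_deck_alt atcf_dicts =
      (PySem.List.dedup ((atcf_dicts.flatMap (fun atcf_dict => atcf_dict)).map (fun p => p.1))).map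
        (fun c => (c, PySem.Str.join "\n"
          (((PySem.List.sorted (atcf_dicts.flatMap (fun atcf_dict => atcf_dict)) (fun p => p.2.1)).filter
              (fun p => p.1 == c)).flatMap (fun p => p.2.2)))) := by
  unfold combine_atcf_dicts_to_deck_alt
  dsimp only
  rw [pv_stepB_eq]
  set flat := atcf_dicts.flatMap (fun atcf_dict => atcf_dict) with hflat
  set groups := (PySem.List.sorted flat (fun p => p.2.1)).foldl
      (fun g p => g.insert p.1 (g.getD p.1 [] ++ p.2.2)) PySem.Dict.empty with hgroups
  have hg : ∀ c, groups.getD c [] =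
      ((PySem.List.sorted flat (fun p => p.2.1)).filter (fun p => p.1 == c)).flatMap (fun p => p.2.2) := by
    intro c
    rw [hgroups, pv_groups_getD]
    simp [PySem.Dict.getD_empty]
  rw [PySem.Dict.items_foldl_insert_fresh (PySem.List.dedup (flat.map (fun p => p.1))) (fun c => c)
        (fun c => PySem.Str.join "\n" (groups.getD c [])) PySem.Dict.empty
        (fun a _ => by simp [PySem.Dict.contains_empty])
        (by simp)]
  simp only [PySem.Dict.empty, List.nil_append]
  refine List.map_congr_left ?_
  intro c _
  simp [hg c]

-- ===== VERDICT (by name: the statement is the Claim_ definition above) =====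
theorem combine_atcf_dicts_to_deck_spec : Claim_equal_combine_atcf_dicts_to_deck := by
  intro atcf_dicts _
  unfold Spec_combine_atcf_dicts_to_deck
  rw [pv_A_eq, pv_B_eq]
  refine List.map_congr_left ?_
  intro c _
  congr 1
  rw [pv_sorted_snd, List.flatMap_map, pv_sorted_filter]
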